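-- pv_equiv track=rewrite | github.com/mtmitchel/codereview | utils/semantic_analyzer.py | _filter_by_sensitivity
-- ===== SOURCE A (Python) =====
-- from typing import List, Dict, Any, Optional
--
-- def _filter_by_sensitivity(issues: List[Dict[str, Any]], sensitivity: str) -> List[Dict[str, Any]]:
--     """
--     Filter issues based on sensitivity level.
--
--     Args:
--         issues (List[Dict[str, Any]]): List of issue dictionaries
--         sensitivity (str): Sensitivity level ('low', 'medium', 'high')
--
--     Returns:
--         List[Dict[str, Any]]: Filtered issues
--     """
--     # Define severity levels to include based on sensitivity
--     if sensitivity == "low":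
--         # Only include high severity issues
--         include_severities = ["high"]
--     elif sensitivity == "medium":
--         # Include medium and high severity issues
--         include_severities = ["medium", "high"]
--     else:  # high sensitivity
--         # Include all issues
--         include_severities = ["info", "low", "medium", "high"]
--
--     return [issue for issue in issues if issue["severity"] in include_severities]
-- ===== SOURCE B (Python) =====
-- def _filter_by_sensitivity(issues, sensitivity):
--     # Staged successive-removal passes: first keep only recognized severities,
--     # then strip one severity level per pass, lowest first, as many levels as
--     # the sensitivity demands.
--     levels = ["info", "low", "medium", "high"]
--     kept = [issue for issue in issues if issue["severity"] in levels]
--     drop_count = {"low": 3, "medium": 2}.get(sensitivity, 0)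
--     for lvl in levels[:drop_count]:
--         kept = [issue for issue in kept if issue["severity"] != lvl]
--     return kept
-- ===== Notes on version B (the rewrite author's own statement) =====
-- stated objective: alternative
-- what changed: Replaces A's single pass testing membership in a per-sensitivity list with staged passes: one pass keeps recognized severities, then one pass per severity level below the sensitivity's cutoff removes that level.
import Mathlib
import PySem

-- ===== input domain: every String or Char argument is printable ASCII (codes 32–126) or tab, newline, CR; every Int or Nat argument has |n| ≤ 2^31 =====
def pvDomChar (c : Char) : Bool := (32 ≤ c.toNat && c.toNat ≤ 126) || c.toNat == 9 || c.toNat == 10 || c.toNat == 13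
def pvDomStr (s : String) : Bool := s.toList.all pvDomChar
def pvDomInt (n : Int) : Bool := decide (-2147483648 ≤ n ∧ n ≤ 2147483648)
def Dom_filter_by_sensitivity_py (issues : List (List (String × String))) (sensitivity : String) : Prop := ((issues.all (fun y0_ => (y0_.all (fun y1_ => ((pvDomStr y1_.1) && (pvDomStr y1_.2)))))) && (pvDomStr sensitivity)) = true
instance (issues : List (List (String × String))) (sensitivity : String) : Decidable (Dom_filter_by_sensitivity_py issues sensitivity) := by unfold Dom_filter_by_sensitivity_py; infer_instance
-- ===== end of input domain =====

-- B replaces A's single-pass membership filter with staged passes: keep recognized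
-- severities, then remove one severity level per pass up to the sensitivity's cutoff
-- (objective: alternative). Equivalence proved where every issue has a "severity" key
-- (both Pythons raise KeyError otherwise).


-- dict lookup (first match in the association list), key-access primitive
def pvAssocGet? (d : List (String × String)) (k : String) : Option String :=
  (d.find? (fun p => p.1 == k)).map Prod.snd

-- ===== PORT A =====
def filter_by_sensitivity_py (issues : List (List (String × String))) (sensitivity : String) : List (List (String × String)) :=
  let include_severities : List String :=
    if sensitivity = "low" then ["high"]
    else if sensitivity = "medium" then ["medium", "high"]
    else ["info", "low", "medium", "high"]
  issues.filter (fun issue =>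
    match pvAssocGet? issue "severity" with
    | some s => include_severities.contains s
    | none => false)   -- KeyError in Python: excluded by Pre_

-- ===== PORT B =====
def filter_by_sensitivity_py_alt (issues : List (List (String × String))) (sensitivity : String) : List (List (String × String)) :=
  let levels : List String := ["info", "low", "medium", "high"]
  let kept := issues.filter (fun issue =>
    match pvAssocGet? issue "severity" with
    | some s => levels.contains s
    | none => false)   -- KeyError in Python: excluded by Pre_
  let drop_count : Nat := if sensitivity = "low" then 3 else if sensitivity = "medium" then 2 else 0
  (levels.take drop_count).foldl
    (fun acc lvl => acc.filter (fun issue =>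
      match pvAssocGet? issue "severity" with
      | some s => !(s == lvl)
      | none => true))   -- unreachable: the first pass kept only issues with the key
    kept

-- ===== PRECONDITION & SPEC =====
-- Pre_: every issue dict has a "severity" key; otherwise both A and B raise KeyError.
def Pre_filter_by_sensitivity_py (issues : List (List (String × String))) (sensitivity : String) : Prop :=
  ∀ issue ∈ issues, (pvAssocGet? issue "severity").isSome = true
instance (issues : List (List (String × String))) (sensitivity : String) : Decidable (Pre_filter_by_sensitivity_py issues sensitivity) := by unfold Pre_filter_by_sensitivity_py; infer_instance

def pvWitness_filter_by_sensitivity_py : (List (List (String × String))) × String :=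
  ([[("severity", "high"), ("id", "1")], [("severity", "low")]], "medium")

def Spec_filter_by_sensitivity_py (issues : List (List (String × String))) (sensitivity : String) (out : List (List (String × String))) : Prop := out = filter_by_sensitivity_py_alt issues sensitivity
instance (issues : List (List (String × String))) (sensitivity : String) (out : List (List (String × String))) : Decidable (Spec_filter_by_sensitivity_py issues sensitivity out) := by unfold Spec_filter_by_sensitivity_py; infer_instance

-- ===== CLAIM =====
def Claim_equal_filter_by_sensitivity_py : Prop := ∀ (issues : List (List (String × String))) (sensitivity : String), Dom_filter_by_sensitivity_py issues sensitivity → Pre_filter_by_sensitivity_py issues sensitivity → Spec_filter_by_sensitivity_py issues sensitivity (filter_by_sensitivity_py issues sensitivity)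

-- ===== LEMMAS AND PROOFS =====

-- a foldl of successive filters is one filter by the conjunction of the predicates
theorem pv_foldl_filter {α β : Type} (g : β → α → Bool) :
    ∀ (lvls : List β) (keep : List α),
      lvls.foldl (fun acc lvl => acc.filter (g lvl)) keep
        = keep.filter (fun i => lvls.all (fun lvl => g lvl i)) := by
  intro lvls
  induction lvls with
  | nil => intro keep; simp
  | cons lvl rest ih =>
    intro keep
    simp only [List.foldl_cons, ih, List.filter_filter, List.all_cons]
    apply List.filter_congr
    intro i _
    cases g lvl i <;> simp

-- the per-issue predicates of A and of B's combined passes agree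
theorem pv_pred_eq (sensitivity s : String) :
    (if sensitivity = "low" then ["high"]
     else if sensitivity = "medium" then ["medium", "high"]
     else ["info", "low", "medium", "high"]).contains s
    = ((((["info", "low", "medium", "high"] : List String).take
          (if sensitivity = "low" then 3 else if sensitivity = "medium" then 2 else 0)).all
            (fun lvl => !(s == lvl)))
        && (["info", "low", "medium", "high"] : List String).contains s) := by
  by_cases h1 : sensitivity = "low" <;> by_cases h2 : sensitivity = "medium" <;>
    by_cases e1 : s = "info" <;> by_cases e2 : s = "low" <;> by_cases e3 : s = "medium" <;>
    by_cases e4 : s = "high" <;>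
    simp [h1, h2, e1, e2, e3, e4]

theorem filter_by_sensitivity_py_eq (issues : List (List (String × String))) (sensitivity : String) :
    filter_by_sensitivity_py issues sensitivity = filter_by_sensitivity_py_alt issues sensitivity := by
  unfold filter_by_sensitivity_py filter_by_sensitivity_py_alt
  simp only [pv_foldl_filter, List.filter_filter]
  apply List.filter_congr
  intro issue _
  cases pvAssocGet? issue "severity" with
  | none => simp
  | some s =>
    simpa using pv_pred_eq sensitivity s

-- ===== VERDICT =====
theorem filter_by_sensitivity_py_spec : Claim_equal_filter_by_sensitivity_py := by
  intro issues sensitivity _ _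
  exact filter_by_sensitivity_py_eq issues sensitivity
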